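-- pv_equiv track=rewrite | github.com/Habtwolde/Triennal | Triennial/app.py | pick_sections
-- ===== SOURCE A (Python) =====
-- SECTION_ORDER = [
--     "Advanced Imaging & AI Tools",
--     "Combination & Targeted Therapies",
--     "Data Commons and Computational Resources",
--     "Environmental Health and Cancer",
--     "Epidemiology & Surveillance",
--     "Genetics, Cell Biology, and -Omics",
--     "Immunotherapy",
--     "Nutrition & Symptom Management",
--     "Preventive Interventions",
--     "Recalcitrant & Hard-to-Treat Cancer Research",
--     "Screening & Early Detection",
--     "Tumor Microenvironment & Immunology",
-- ]
--
-- def pick_sections(card: dict) -> list[str]: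
--     # Activity Type removed from routing signal per client requirement
--     text = " ".join([
--         card.get("Activity Name", ""),
--         card.get("Activity Description", ""),
--         card.get("Importance", ""),
--         card.get("Collaborating ICOs/Agencies/Orgs", ""),
--     ]).lower()
--
--     hits = set()
--
--     def has_any(keys):
--         return any(k in text for k in keys)
--
--     if has_any(["image", "imaging", "radiology", "ai", "ml", "deep learning", "pet", "mri", "ct", "midrc"]):
--         hits.add("Advanced Imaging & AI Tools")
--     if has_any(["combination", "combo", "targeted", "inhibitor", "kinase", "precision", "molecularly targeted", "combo therapy"]):
--         hits.add("Combination & Targeted Therapies")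
--     if has_any(["commons", "repository", "portal", "database", "computational", "cloud", "workflow", "data hub", "registry"]):
--         hits.add("Data Commons and Computational Resources")
--     if has_any(["environmental", "exposure", "toxic", "pollut", "air", "water", "environment", "occupational"]):
--         hits.add("Environmental Health and Cancer")
--     if has_any(["epidemiology", "surveillance", "registry", "incidence", "prevalence", "cohort", "population"]):
--         hits.add("Epidemiology & Surveillance")
--     if has_any(["genetic", "genome", "omics", "transcript", "proteomic", "epigen", "cell", "mechanism", "mutation", "gene"]):
--         hits.add("Genetics, Cell Biology, and -Omics")
--     if has_any(["immunotherapy", "checkpoint", "t cell", "car-t", "immune", "nk cell", "neoantigen"]):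
--         hits.add("Immunotherapy")
--     if has_any(["nutrition", "diet", "exercise", "symptom", "quality of life", "palliative", "cachexia"]):
--         hits.add("Nutrition & Symptom Management")
--     if has_any(["prevent", "screen", "risk reduction", "vaccin", "hpv", "self-collection"]):
--         hits.add("Preventive Interventions")
--     if has_any(["recalcitrant", "hard-to-treat", "glioblastoma", "pancreatic", "rare", "refractory"]):
--         hits.add("Recalcitrant & Hard-to-Treat Cancer Research")
--     if has_any(["screen", "early detection", "biomarker", "liquid biopsy", "mcde"]):
--         hits.add("Screening & Early Detection")
--     if has_any(["microenvironment", "stroma", "stromal", "macrophage", "myeloid", "tme", "caf"]):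
--         hits.add("Tumor Microenvironment & Immunology")
--
--     if not hits:
--         hits.add("Genetics, Cell Biology, and -Omics")
--
--     return [s for s in SECTION_ORDER if s in hits]
-- ===== SOURCE B (Python) =====
-- SECTION_ORDER = [
--     "Advanced Imaging & AI Tools",
--     "Combination & Targeted Therapies",
--     "Data Commons and Computational Resources",
--     "Environmental Health and Cancer",
--     "Epidemiology & Surveillance",
--     "Genetics, Cell Biology, and -Omics",
--     "Immunotherapy",
--     "Nutrition & Symptom Management",
--     "Preventive Interventions",
--     "Recalcitrant & Hard-to-Treat Cancer Research",
--     "Screening & Early Detection",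
--     "Tumor Microenvironment & Immunology",
-- ]
--
-- # keyword -> bitmask of section indices in SECTION_ORDER (bit j = section j);
-- # "registry" and "screen" route to two sections each.
-- _KW = {
--     "image": 1,
--     "imaging": 1,
--     "radiology": 1,
--     "ai": 1,
--     "ml": 1,
--     "deep learning": 1,
--     "pet": 1,
--     "mri": 1,
--     "ct": 1,
--     "midrc": 1,
--     "combination": 2,
--     "combo": 2,
--     "targeted": 2,
--     "inhibitor": 2,
--     "kinase": 2,
--     "precision": 2,
--     "molecularly targeted": 2,
--     "combo therapy": 2,
--     "commons": 4,
--     "repository": 4,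
--     "portal": 4,
--     "database": 4,
--     "computational": 4,
--     "cloud": 4,
--     "workflow": 4,
--     "data hub": 4,
--     "environmental": 8,
--     "exposure": 8,
--     "toxic": 8,
--     "pollut": 8,
--     "air": 8,
--     "water": 8,
--     "environment": 8,
--     "occupational": 8,
--     "epidemiology": 16,
--     "surveillance": 16,
--     "registry": 20,
--     "incidence": 16,
--     "prevalence": 16,
--     "cohort": 16,
--     "population": 16,
--     "genetic": 32,
--     "genome": 32,
--     "omics": 32,
--     "transcript": 32,
--     "proteomic": 32,
--     "epigen": 32,
--     "cell": 32,
--     "mechanism": 32,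
--     "mutation": 32,
--     "gene": 32,
--     "immunotherapy": 64,
--     "checkpoint": 64,
--     "t cell": 64,
--     "car-t": 64,
--     "immune": 64,
--     "nk cell": 64,
--     "neoantigen": 64,
--     "nutrition": 128,
--     "diet": 128,
--     "exercise": 128,
--     "symptom": 128,
--     "quality of life": 128,
--     "palliative": 128,
--     "cachexia": 128,
--     "prevent": 256,
--     "screen": 1280,
--     "risk reduction": 256,
--     "vaccin": 256,
--     "hpv": 256,
--     "self-collection": 256,
--     "recalcitrant": 512,
--     "hard-to-treat": 512,
--     "glioblastoma": 512,
--     "pancreatic": 512,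
--     "rare": 512,
--     "refractory": 512,
--     "early detection": 1024,
--     "biomarker": 1024,
--     "liquid biopsy": 1024,
--     "mcde": 1024,
--     "microenvironment": 2048,
--     "stroma": 2048,
--     "stromal": 2048,
--     "macrophage": 2048,
--     "myeloid": 2048,
--     "tme": 2048,
--     "caf": 2048,
-- }
--
-- def pick_sections(card: dict) -> list[str]:
--     text = " ".join([
--         card.get("Activity Name", ""),
--         card.get("Activity Description", ""),
--         card.get("Importance", ""),
--         card.get("Collaborating ICOs/Agencies/Orgs", ""),
--     ]).lower()
--     # single left-to-right scan: at each position try every keyword anchored there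
--     mask = 0
--     for i in range(len(text)):
--         for k, bits in _KW.items():
--             if text.startswith(k, i):
--                 mask |= bits
--     if mask == 0:
--         mask = 1 << 5  # "Genetics, Cell Biology, and -Omics"
--     return [s for i, s in enumerate(SECTION_ORDER) if (mask >> i) & 1]
-- ===== Notes on version B (the rewrite author's own statement) =====
-- stated objective: alternative
-- what changed: Replaces twelve independent substring ('k in text') tests building a set with a single left-to-right scan over text positions doing anchored prefix matches against one keyword-to-section-bitmask dictionary, accumulating an integer bitmask that is decoded into the ordered section list.
import Mathlib
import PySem

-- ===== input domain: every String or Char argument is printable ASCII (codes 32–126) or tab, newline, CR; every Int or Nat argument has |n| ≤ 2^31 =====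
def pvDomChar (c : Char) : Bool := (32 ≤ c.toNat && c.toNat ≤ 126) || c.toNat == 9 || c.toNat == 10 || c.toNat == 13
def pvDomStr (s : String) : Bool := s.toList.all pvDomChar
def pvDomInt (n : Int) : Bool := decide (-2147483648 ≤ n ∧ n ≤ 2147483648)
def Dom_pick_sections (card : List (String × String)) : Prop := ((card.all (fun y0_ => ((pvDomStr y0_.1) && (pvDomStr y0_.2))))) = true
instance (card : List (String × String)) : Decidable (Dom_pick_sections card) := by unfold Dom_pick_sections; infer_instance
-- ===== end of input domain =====

-- B replaces A's twelve independent substring tests (set of names) by one left-to-right scan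
-- over the text's positions with anchored prefix matches against a keyword→section-bitmask
-- dictionary, decoding the accumulated bitmask into the ordered section list (objective: alternative).

-- ===== PORT A =====
def SECTION_ORDER : List String := [
"Advanced Imaging & AI Tools", "Combination & Targeted Therapies", "Data Commons and Computational Resources", "Environmental Health and Cancer", "Epidemiology & Surveillance", "Genetics, Cell Biology, and -Omics", "Immunotherapy", "Nutrition & Symptom Management", "Preventive Interventions", "Recalcitrant & Hard-to-Treat Cancer Research", "Screening & Early Detection", "Tumor Microenvironment & Immunology"]

-- A's body after `text` is computed (helper so the common `text` can be abstracted in the proof)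
def pickA_core (text : String) : List String :=
  let hits : PySem.Set String := PySem.Set.empty
  let hits := if ((["image", "imaging", "radiology", "ai", "ml", "deep learning", "pet", "mri", "ct", "midrc"] : List String).any (fun k => PySem.Str.isIn k text)) then PySem.Set.add hits "Advanced Imaging & AI Tools" else hits
  let hits := if ((["combination", "combo", "targeted", "inhibitor", "kinase", "precision", "molecularly targeted", "combo therapy"] : List String).any (fun k => PySem.Str.isIn k text)) then PySem.Set.add hits "Combination & Targeted Therapies" else hits
  let hits := if ((["commons", "repository", "portal", "database", "computational", "cloud", "workflow", "data hub", "registry"] : List String).any (fun k => PySem.Str.isIn k text)) then PySem.Set.add hits "Data Commons and Computational Resources" else hits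
  let hits := if ((["environmental", "exposure", "toxic", "pollut", "air", "water", "environment", "occupational"] : List String).any (fun k => PySem.Str.isIn k text)) then PySem.Set.add hits "Environmental Health and Cancer" else hits
  let hits := if ((["epidemiology", "surveillance", "registry", "incidence", "prevalence", "cohort", "population"] : List String).any (fun k => PySem.Str.isIn k text)) then PySem.Set.add hits "Epidemiology & Surveillance" else hits
  let hits := if ((["genetic", "genome", "omics", "transcript", "proteomic", "epigen", "cell", "mechanism", "mutation", "gene"] : List String).any (fun k => PySem.Str.isIn k text)) then PySem.Set.add hits "Genetics, Cell Biology, and -Omics" else hits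
  let hits := if ((["immunotherapy", "checkpoint", "t cell", "car-t", "immune", "nk cell", "neoantigen"] : List String).any (fun k => PySem.Str.isIn k text)) then PySem.Set.add hits "Immunotherapy" else hits
  let hits := if ((["nutrition", "diet", "exercise", "symptom", "quality of life", "palliative", "cachexia"] : List String).any (fun k => PySem.Str.isIn k text)) then PySem.Set.add hits "Nutrition & Symptom Management" else hits
  let hits := if ((["prevent", "screen", "risk reduction", "vaccin", "hpv", "self-collection"] : List String).any (fun k => PySem.Str.isIn k text)) then PySem.Set.add hits "Preventive Interventions" else hits
  let hits := if ((["recalcitrant", "hard-to-treat", "glioblastoma", "pancreatic", "rare", "refractory"] : List String).any (fun k => PySem.Str.isIn k text)) then PySem.Set.add hits "Recalcitrant & Hard-to-Treat Cancer Research" else hits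
  let hits := if ((["screen", "early detection", "biomarker", "liquid biopsy", "mcde"] : List String).any (fun k => PySem.Str.isIn k text)) then PySem.Set.add hits "Screening & Early Detection" else hits
  let hits := if ((["microenvironment", "stroma", "stromal", "macrophage", "myeloid", "tme", "caf"] : List String).any (fun k => PySem.Str.isIn k text)) then PySem.Set.add hits "Tumor Microenvironment & Immunology" else hits
  let hits := if hits.isEmpty then PySem.Set.add hits "Genetics, Cell Biology, and -Omics" else hits
  SECTION_ORDER.filter (fun s => PySem.Set.contains hits s)

def pick_sections (card : List (String × String)) : List String :=
  let d := PySem.Dict.mk card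
  pickA_core (PySem.Str.lower (PySem.Str.join " "
    [d.getD "Activity Name" "", d.getD "Activity Description" "",
     d.getD "Importance" "", d.getD "Collaborating ICOs/Agencies/Orgs" ""]))

-- ===== PORT B =====
-- _KW: keyword -> bitmask of section indices (a Python dict of distinct literal keys,
-- iterated in insertion order -> association list)
def pvKW : List (String × Nat) := [
  ("image", 1), ("imaging", 1), ("radiology", 1), ("ai", 1), ("ml", 1),
  ("deep learning", 1), ("pet", 1), ("mri", 1), ("ct", 1), ("midrc", 1),
  ("combination", 2), ("combo", 2), ("targeted", 2), ("inhibitor", 2), ("kinase", 2),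
  ("precision", 2), ("molecularly targeted", 2), ("combo therapy", 2),
  ("commons", 4), ("repository", 4), ("portal", 4), ("database", 4), ("computational", 4),
  ("cloud", 4), ("workflow", 4), ("data hub", 4),
  ("environmental", 8), ("exposure", 8), ("toxic", 8), ("pollut", 8), ("air", 8),
  ("water", 8), ("environment", 8), ("occupational", 8),
  ("epidemiology", 16), ("surveillance", 16), ("registry", 20), ("incidence", 16), ("prevalence", 16),
  ("cohort", 16), ("population", 16),
  ("genetic", 32), ("genome", 32), ("omics", 32), ("transcript", 32), ("proteomic", 32),
  ("epigen", 32), ("cell", 32), ("mechanism", 32), ("mutation", 32), ("gene", 32),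
  ("immunotherapy", 64), ("checkpoint", 64), ("t cell", 64), ("car-t", 64), ("immune", 64),
  ("nk cell", 64), ("neoantigen", 64),
  ("nutrition", 128), ("diet", 128), ("exercise", 128), ("symptom", 128),
  ("quality of life", 128), ("palliative", 128), ("cachexia", 128),
  ("prevent", 256), ("screen", 1280), ("risk reduction", 256), ("vaccin", 256),
  ("hpv", 256), ("self-collection", 256),
  ("recalcitrant", 512), ("hard-to-treat", 512), ("glioblastoma", 512), ("pancreatic", 512),
  ("rare", 512), ("refractory", 512),
  ("early detection", 1024), ("biomarker", 1024), ("liquid biopsy", 1024), ("mcde", 1024),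
  ("microenvironment", 2048), ("stroma", 2048), ("stromal", 2048), ("macrophage", 2048),
  ("myeloid", 2048), ("tme", 2048), ("caf", 2048)]

-- B's body after `text`: for i in range(len(text)): for k, bits in _KW.items():
--   if text.startswith(k, i): mask |= bits
-- (text.startswith(k, i) with 0 ≤ i ≤ len(text) is exactly startswith on the i-th suffix)
def pickB_core (text : String) : List String :=
  let tl := text.toList
  let mask := (List.range tl.length).foldl
    (fun m i => pvKW.foldl
      (fun m p => if PySem.Chars.startswith (tl.drop i) p.1.toList then m ||| p.2 else m) m) 0
  let mask := if mask = 0 then 1 <<< 5 else mask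
  -- enumerate yields i ≥ 0, so `mask >> i` is exactly `mask >>> p.1.toNat`
  (PySem.List.enumerate SECTION_ORDER).filterMap
    (fun p => if (mask >>> p.1.toNat) &&& 1 ≠ 0 then some p.2 else none)

def pick_sections_alt (card : List (String × String)) : List String :=
  let d := PySem.Dict.mk card
  pickB_core (PySem.Str.lower (PySem.Str.join " "
    [d.getD "Activity Name" "", d.getD "Activity Description" "",
     d.getD "Importance" "", d.getD "Collaborating ICOs/Agencies/Orgs" ""]))

-- ===== PRECONDITION & SPEC =====
def Spec_pick_sections (card : List (String × String)) (out : List String) : Prop := out = pick_sections_alt card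
instance (card : List (String × String)) (out : List String) : Decidable (Spec_pick_sections card out) := by unfold Spec_pick_sections; infer_instance

-- ===== CLAIM (what is proved, stated in full; the proofs are below) =====
def Claim_equal_pick_sections : Prop := ∀ (card : List (String × String)), Dom_pick_sections card → Spec_pick_sections card (pick_sections card)

-- ===== LEMMAS AND PROOFS =====

-- A's `has_any`, applied to the literal keyword lists (used to state the mask characterisation)
def pvQ (ks : List String) (text : String) : Bool := ks.any (fun k => PySem.Str.isIn k text)

-- the bitmask determined by the twelve section-match booleans
def pvF (b0 : Bool) (b1 : Bool) (b2 : Bool) (b3 : Bool) (b4 : Bool) (b5 : Bool) (b6 : Bool) (b7 : Bool) (b8 : Bool) (b9 : Bool) (b10 : Bool) (b11 : Bool) : Nat :=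
  (if b0 then 1 else 0) ||| (if b1 then 2 else 0) ||| (if b2 then 4 else 0) ||| (if b3 then 8 else 0) ||| (if b4 then 16 else 0) ||| (if b5 then 32 else 0) ||| (if b6 then 64 else 0) ||| (if b7 then 128 else 0) ||| (if b8 then 256 else 0) ||| (if b9 then 512 else 0) ||| (if b10 then 1024 else 0) ||| (if b11 then 2048 else 0)

theorem any_congr_mem {α : Type} (l : List α) (f g : α → Bool)
    (h : ∀ x ∈ l, f x = g x) : l.any f = l.any g := by
  induction l with
  | nil => rfl
  | cons x xs ih =>
    simp only [List.any_cons, h x (List.mem_cons_self), ih (fun y hy => h y (List.mem_cons_of_mem x hy))]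

theorem any_comm {α β : Type} (l : List α) (r : List β) (g : α → β → Bool) :
    l.any (fun i => r.any (fun p => g i p)) = r.any (fun p => l.any (fun i => g i p)) := by
  rw [Bool.eq_iff_iff]
  simp only [List.any_eq_true]
  tauto

theorem any_and_right {α : Type} (l : List α) (f : α → Bool) (c : Bool) :
    l.any (fun x => f x && c) = (l.any f && c) := by
  cases c <;> simp

-- the j-th bit of a fold of bitwise-ors
theorem testBit_foldl_or {α : Type} (l : List α) (f : α → Nat) (a : Nat) (j : Nat) :
    (l.foldl (fun m x => m ||| f x) a).testBit j = (a.testBit j || l.any (fun x => (f x).testBit j)) := by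
  induction l generalizing a with
  | nil => simp
  | cons x xs ih => simp [List.foldl_cons, ih, Nat.testBit_or, Bool.or_assoc]

theorem foldl_or_lt {α : Type} (f : α → Nat) :
    ∀ (l : List α) (a : Nat), a < 2 ^ 12 → (∀ x ∈ l, f x < 2 ^ 12) →
      l.foldl (fun m x => m ||| f x) a < 2 ^ 12 := by
  intro l
  induction l with
  | nil => exact fun a ha _ => ha
  | cons x xs ih =>
    intro a ha hf
    exact ih _ (Nat.or_lt_two_pow ha (hf x List.mem_cons_self))
      (fun y hy => hf y (List.mem_cons_of_mem x hy))

theorem fold_if_or {α : Type} (l : List α) (c : α → Bool) (f : α → Nat) (a : Nat) :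
    l.foldl (fun m x => if c x then m ||| f x else m) a
      = l.foldl (fun m x => m ||| (if c x then f x else 0)) a := by
  induction l generalizing a with
  | nil => rfl
  | cons x xs ih => by_cases h : c x <;> simp [List.foldl_cons, h, ih]

-- scanning all positions for an anchored match of a nonempty pattern is substring search
theorem any_range_startswith (tl kw : List Char) (h : kw ≠ []) :
    ((List.range tl.length).any (fun i => PySem.Chars.startswith (tl.drop i) kw))
      = PySem.Chars.isIn kw tl := by
  by_cases hin : PySem.Chars.isIn kw tl = true
  · rw [hin, List.any_eq_true]
    rcases (PySem.Chars.exists_prefix_drop_iff_isIn kw tl).2 hin with ⟨j, hj⟩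
    by_cases hjl : j < tl.length
    · exact ⟨j, List.mem_range.2 hjl, (PySem.Chars.startswith_iff _ _).2 hj⟩
    · exact absurd (List.prefix_nil.1 (List.drop_eq_nil_of_le (le_of_not_gt hjl) ▸ hj)) h
  · rw [Bool.eq_false_iff.2 hin, List.any_eq_false]
    intro i _ hcon
    exact hin ((PySem.Chars.exists_prefix_drop_iff_isIn kw tl).1
      ⟨i, (PySem.Chars.startswith_iff _ _).1 hcon⟩)

theorem pvKW_keys_nonempty : ∀ p ∈ pvKW, p.1.toList ≠ [] := by decide

theorem pvKW_vals_lt : ∀ p ∈ pvKW, p.2 < 2 ^ 12 := by decide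

-- the scan, with each step rewritten as one bitwise-or contribution
theorem mask_shape (tl : List Char) :
    (List.range tl.length).foldl
      (fun m i => pvKW.foldl
        (fun m (p : String × Nat) => if PySem.Chars.startswith (tl.drop i) p.1.toList then m ||| p.2 else m) m) 0
    = (List.range tl.length).foldl
        (fun m i => m ||| pvKW.foldl
          (fun m (p : String × Nat) => m ||| (if PySem.Chars.startswith (tl.drop i) p.1.toList then p.2 else 0)) 0) 0 := by
  apply PySem.List.foldl_congr_mem
  intro m i _
  rw [fold_if_or]
  apply Nat.eq_of_testBit_eq
  intro k
  rw [Nat.testBit_or, testBit_foldl_or, testBit_foldl_or]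
  simp

theorem mask_lt (tl : List Char) :
    (List.range tl.length).foldl
      (fun m i => pvKW.foldl
        (fun m (p : String × Nat) => if PySem.Chars.startswith (tl.drop i) p.1.toList then m ||| p.2 else m) m) 0 < 2 ^ 12 := by
  rw [mask_shape]
  apply foldl_or_lt (fun i => pvKW.foldl
    (fun m (p : String × Nat) => m ||| (if PySem.Chars.startswith (tl.drop i) p.1.toList then p.2 else 0)) 0) _ _ (by norm_num)
  intro i _
  apply foldl_or_lt (fun p : String × Nat =>
    if PySem.Chars.startswith (tl.drop i) p.1.toList then p.2 else 0) _ _ (by norm_num)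
  intro p hp
  split
  · exact pvKW_vals_lt p hp
  · norm_num

-- the j-th bit of the scan's mask: some keyword carrying bit j occurs in the text
theorem testBit_mask (tl : List Char) (j : Nat) :
    ((List.range tl.length).foldl
      (fun m i => pvKW.foldl
        (fun m (p : String × Nat) => if PySem.Chars.startswith (tl.drop i) p.1.toList then m ||| p.2 else m) m) 0).testBit j
    = pvKW.any (fun p => PySem.Chars.isIn p.1.toList tl && p.2.testBit j) := by
  rw [mask_shape, testBit_foldl_or]
  simp only [Nat.zero_testBit, Bool.false_or]
  calc (List.range tl.length).any (fun i =>
        (pvKW.foldl (fun m (p : String × Nat) => m ||| (if PySem.Chars.startswith (tl.drop i) p.1.toList then p.2 else 0)) 0).testBit j)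
      = (List.range tl.length).any (fun i => pvKW.any
          (fun p => PySem.Chars.startswith (tl.drop i) p.1.toList && p.2.testBit j)) := by
        apply any_congr_mem
        intro i _
        rw [testBit_foldl_or]
        simp only [Nat.zero_testBit, Bool.false_or]
        apply any_congr_mem
        intro p _
        by_cases h : PySem.Chars.startswith (tl.drop i) p.1.toList <;> simp [h]
    _ = pvKW.any (fun p => PySem.Chars.isIn p.1.toList tl && p.2.testBit j) := by
        rw [any_comm]
        apply any_congr_mem
        intro p hp
        rw [any_and_right, any_range_startswith tl p.1.toList (pvKW_keys_nonempty p hp)]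

theorem pvF_lt (b0 : Bool) (b1 : Bool) (b2 : Bool) (b3 : Bool) (b4 : Bool) (b5 : Bool) (b6 : Bool) (b7 : Bool) (b8 : Bool) (b9 : Bool) (b10 : Bool) (b11 : Bool) : pvF b0 b1 b2 b3 b4 b5 b6 b7 b8 b9 b10 b11 < 2 ^ 12 := by
  unfold pvF
  repeat' apply Nat.or_lt_two_pow
  all_goals split <;> norm_num

theorem eq_of_lt_of_testBit12 (x y : Nat) (hx : x < 2 ^ 12) (hy : y < 2 ^ 12)
    (h : ∀ j < 12, x.testBit j = y.testBit j) : x = y := by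
  apply Nat.eq_of_testBit_eq
  intro j
  by_cases hj : j < 12
  · exact h j hj
  · rw [Nat.testBit_lt_two_pow (lt_of_lt_of_le hx (Nat.pow_le_pow_right (by norm_num) (le_of_not_gt hj))),
        Nat.testBit_lt_two_pow (lt_of_lt_of_le hy (Nat.pow_le_pow_right (by norm_num) (le_of_not_gt hj)))]

-- per-section: the keywords carrying bit j are exactly A's j-th keyword list
theorem pv_sec0 (q : String → Bool) :
    pvKW.any (fun p => q p.1 && p.2.testBit 0) = (["image", "imaging", "radiology", "ai", "ml", "deep learning", "pet", "mri", "ct", "midrc"] : List String).any q := by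
  simp [pvKW, Nat.testBit]

theorem pv_sec1 (q : String → Bool) :
    pvKW.any (fun p => q p.1 && p.2.testBit 1) = (["combination", "combo", "targeted", "inhibitor", "kinase", "precision", "molecularly targeted", "combo therapy"] : List String).any q := by
  simp [pvKW, Nat.testBit]

theorem pv_sec2 (q : String → Bool) :
    pvKW.any (fun p => q p.1 && p.2.testBit 2) = (["commons", "repository", "portal", "database", "computational", "cloud", "workflow", "data hub", "registry"] : List String).any q := by
  simp [pvKW, Nat.testBit]

theorem pv_sec3 (q : String → Bool) :
    pvKW.any (fun p => q p.1 && p.2.testBit 3) = (["environmental", "exposure", "toxic", "pollut", "air", "water", "environment", "occupational"] : List String).any q := by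
  simp [pvKW, Nat.testBit]

theorem pv_sec4 (q : String → Bool) :
    pvKW.any (fun p => q p.1 && p.2.testBit 4) = (["epidemiology", "surveillance", "registry", "incidence", "prevalence", "cohort", "population"] : List String).any q := by
  simp [pvKW, Nat.testBit]

theorem pv_sec5 (q : String → Bool) :
    pvKW.any (fun p => q p.1 && p.2.testBit 5) = (["genetic", "genome", "omics", "transcript", "proteomic", "epigen", "cell", "mechanism", "mutation", "gene"] : List String).any q := by
  simp [pvKW, Nat.testBit]

theorem pv_sec6 (q : String → Bool) :
    pvKW.any (fun p => q p.1 && p.2.testBit 6) = (["immunotherapy", "checkpoint", "t cell", "car-t", "immune", "nk cell", "neoantigen"] : List String).any q := by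
  simp [pvKW, Nat.testBit]

theorem pv_sec7 (q : String → Bool) :
    pvKW.any (fun p => q p.1 && p.2.testBit 7) = (["nutrition", "diet", "exercise", "symptom", "quality of life", "palliative", "cachexia"] : List String).any q := by
  simp [pvKW, Nat.testBit]

theorem pv_sec8 (q : String → Bool) :
    pvKW.any (fun p => q p.1 && p.2.testBit 8) = (["prevent", "screen", "risk reduction", "vaccin", "hpv", "self-collection"] : List String).any q := by
  simp [pvKW, Nat.testBit]

theorem pv_sec9 (q : String → Bool) :
    pvKW.any (fun p => q p.1 && p.2.testBit 9) = (["recalcitrant", "hard-to-treat", "glioblastoma", "pancreatic", "rare", "refractory"] : List String).any q := by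
  simp [pvKW, Nat.testBit]

theorem pv_sec10 (q : String → Bool) :
    pvKW.any (fun p => q p.1 && p.2.testBit 10) = (["screen", "early detection", "biomarker", "liquid biopsy", "mcde"] : List String).any q := by
  simp [pvKW, Nat.testBit]

theorem pv_sec11 (q : String → Bool) :
    pvKW.any (fun p => q p.1 && p.2.testBit 11) = (["microenvironment", "stroma", "stromal", "macrophage", "myeloid", "tme", "caf"] : List String).any q := by
  simp [pvKW, Nat.testBit]

theorem testBit_if (b : Bool) (c j : Nat) : (if b then c else 0).testBit j = (b && c.testBit j) := by
  cases b <;> simp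

-- the scan's mask equals the bitmask determined by A's twelve section-match booleans
theorem mask_eq_F (text : String) :
    (List.range text.toList.length).foldl
      (fun m i => pvKW.foldl
        (fun m (p : String × Nat) => if PySem.Chars.startswith (text.toList.drop i) p.1.toList then m ||| p.2 else m) m) 0
    = pvF (pvQ ["image", "imaging", "radiology", "ai", "ml", "deep learning", "pet", "mri", "ct", "midrc"] text) (pvQ ["combination", "combo", "targeted", "inhibitor", "kinase", "precision", "molecularly targeted", "combo therapy"] text) (pvQ ["commons", "repository", "portal", "database", "computational", "cloud", "workflow", "data hub", "registry"] text) (pvQ ["environmental", "exposure", "toxic", "pollut", "air", "water", "environment", "occupational"] text) (pvQ ["epidemiology", "surveillance", "registry", "incidence", "prevalence", "cohort", "population"] text) (pvQ ["genetic", "genome", "omics", "transcript", "proteomic", "epigen", "cell", "mechanism", "mutation", "gene"] text) (pvQ ["immunotherapy", "checkpoint", "t cell", "car-t", "immune", "nk cell", "neoantigen"] text) (pvQ ["nutrition", "diet", "exercise", "symptom", "quality of life", "palliative", "cachexia"] text) (pvQ ["prevent", "screen", "risk reduction", "vaccin", "hpv", "self-collection"] text) (pvQ ["recalcitrant", "hard-to-treat",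 "glioblastoma", "pancreatic", "rare", "refractory"] text) (pvQ ["screen", "early detection", "biomarker", "liquid biopsy", "mcde"] text) (pvQ ["microenvironment", "stroma", "stromal", "macrophage", "myeloid", "tme", "caf"] text) := by
  apply eq_of_lt_of_testBit12 _ _ (mask_lt _) (pvF_lt _ _ _ _ _ _ _ _ _ _ _ _)
  intro j hj
  rw [testBit_mask]
  have hq : ∀ ks : List String, pvQ ks text = ks.any (fun k => PySem.Chars.isIn k.toList text.toList) := by
    intro ks
    unfold pvQ
    apply any_congr_mem
    intro k _
    simp
  unfold pvF
  simp only [Nat.testBit_or, testBit_if, hq]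
  interval_cases j <;>
    simp only [pv_sec0 (fun k => PySem.Chars.isIn k.toList text.toList),
      pv_sec1 (fun k => PySem.Chars.isIn k.toList text.toList),
      pv_sec2 (fun k => PySem.Chars.isIn k.toList text.toList),
      pv_sec3 (fun k => PySem.Chars.isIn k.toList text.toList),
      pv_sec4 (fun k => PySem.Chars.isIn k.toList text.toList),
      pv_sec5 (fun k => PySem.Chars.isIn k.toList text.toList),
      pv_sec6 (fun k => PySem.Chars.isIn k.toList text.toList),
      pv_sec7 (fun k => PySem.Chars.isIn k.toList text.toList),
      pv_sec8 (fun k => PySem.Chars.isIn k.toList text.toList),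
      pv_sec9 (fun k => PySem.Chars.isIn k.toList text.toList),
      pv_sec10 (fun k => PySem.Chars.isIn k.toList text.toList),
      pv_sec11 (fun k => PySem.Chars.isIn k.toList text.toList)] <;>
    simp [Nat.testBit, Nat.shiftRight_eq_div_pow]

-- the two tails agree as functions of the twelve booleans (finite check)
set_option maxHeartbeats 4000000 in
theorem pv_core : ∀ (b0 : Bool) (b1 : Bool) (b2 : Bool) (b3 : Bool) (b4 : Bool) (b5 : Bool) (b6 : Bool) (b7 : Bool) (b8 : Bool) (b9 : Bool) (b10 : Bool) (b11 : Bool),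
    (
  let hits : PySem.Set String := PySem.Set.empty
  let hits := if b0 then PySem.Set.add hits "Advanced Imaging & AI Tools" else hits
  let hits := if b1 then PySem.Set.add hits "Combination & Targeted Therapies" else hits
  let hits := if b2 then PySem.Set.add hits "Data Commons and Computational Resources" else hits
  let hits := if b3 then PySem.Set.add hits "Environmental Health and Cancer" else hits
  let hits := if b4 then PySem.Set.add hits "Epidemiology & Surveillance" else hits
  let hits := if b5 then PySem.Set.add hits "Genetics, Cell Biology, and -Omics" else hits
  let hits := if b6 then PySem.Set.add hits "Immunotherapy" else hits
  let hits := if b7 then PySem.Set.add hits "Nutrition & Symptom Management" else hits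
  let hits := if b8 then PySem.Set.add hits "Preventive Interventions" else hits
  let hits := if b9 then PySem.Set.add hits "Recalcitrant & Hard-to-Treat Cancer Research" else hits
  let hits := if b10 then PySem.Set.add hits "Screening & Early Detection" else hits
  let hits := if b11 then PySem.Set.add hits "Tumor Microenvironment & Immunology" else hits
  let hits := if hits.isEmpty then PySem.Set.add hits "Genetics, Cell Biology, and -Omics" else hits
  SECTION_ORDER.filter (fun s => PySem.Set.contains hits s)) = (
  let mask := pvF b0 b1 b2 b3 b4 b5 b6 b7 b8 b9 b10 b11
  let mask := if mask = 0 then 1 <<< 5 else mask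
  (PySem.List.enumerate SECTION_ORDER).filterMap
    (fun p => if (mask >>> p.1.toNat) &&& 1 ≠ 0 then some p.2 else none)) := by
  decide

theorem core_eq (text : String) : pickA_core text = pickB_core text := by
  simp only [pickA_core, pickB_core]
  rw [mask_eq_F text]
  exact pv_core (pvQ ["image", "imaging", "radiology", "ai", "ml", "deep learning", "pet", "mri", "ct", "midrc"] text) (pvQ ["combination", "combo", "targeted", "inhibitor", "kinase", "precision", "molecularly targeted", "combo therapy"] text) (pvQ ["commons", "repository", "portal", "database", "computational", "cloud", "workflow", "data hub", "registry"] text) (pvQ ["environmental", "exposure", "toxic", "pollut", "air", "water", "environment", "occupational"] text) (pvQ ["epidemiology", "surveillance", "registry", "incidence", "prevalence", "cohort", "population"] text) (pvQ ["genetic", "genome", "omics", "transcript", "proteomic", "epigen", "cell", "mechanism", "mutation", "gene"] text) (pvQ ["immunotherapy", "checkpoint", "t cell", "car-t", "immune", "nk cell", "neoantigen"] text) (pvQ ["nutrition", "diet", "exercise", "symptom", "quality of life", "palliative", "cachexia"] text) (pvQ ["prevent", "screen", "risk reduction", "vaccin", "hpv", "self-collection"] text) (pvQ ["recalcitrant",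 "hard-to-treat", "glioblastoma", "pancreatic", "rare", "refractory"] text) (pvQ ["screen", "early detection", "biomarker", "liquid biopsy", "mcde"] text) (pvQ ["microenvironment", "stroma", "stromal", "macrophage", "myeloid", "tme", "caf"] text)

-- ===== VERDICT (by name: the statement is the Claim_ definition above) =====
theorem pick_sections_spec : Claim_equal_pick_sections := by
  intro card _
  unfold Spec_pick_sections pick_sections pick_sections_alt
  exact core_eq _
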